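-- pv_equiv track=rewrite | github.com/Cakecrisps/NFDetector | general/uTrafficMonitor.py | _extract_filename_from_uri
-- ===== SOURCE A (Python) =====
-- from typing import List, Dict, Any, Set, Optional
--
-- def _extract_filename_from_uri(uri: str) -> Optional[str]:
--     """Извлекает имя файла из URI."""
--     try:
--         path = uri.split('?')[0] if '?' in uri else uri
--
--         filename = path.split('/')[-1]
--
--         if filename and '.' in filename and not filename.endswith('/'):
--             file_extensions = [
--                 '.exe', '.dll', '.zip', '.rar', '.7z', '.tar', '.gz',
--                 '.pdf', '.doc', '.docx', '.xls', '.xlsx', '.ppt', '.pptx',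
--                 '.jpg', '.jpeg', '.png', '.gif', '.bmp', '.tiff',
--                 '.mp3', '.mp4', '.avi', '.mkv', '.mov',
--                 '.txt', '.log', '.csv', '.json', '.xml',
--                 '.iso', '.img', '.bin',
--                 '.msi', '.bat', '.sh', '.ps1', '.py', '.js', '.html', '.php'
--             ]
--
--             if any(filename.lower().endswith(ext) for ext in file_extensions):
--                 return filename
--
--             if '.' in filename and len(filename.split('.')[-1]) > 0:
--                 return filename
--
--     except:
--         pass
--     return None
-- ===== SOURCE B (Python) =====
-- from typing import Optional
--
-- def _extract_filename_from_uri(uri: str) -> Optional[str]: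
--     """Извлекает имя файла из URI."""
--     try:
--         buf = []
--         seen_dot = False
--         for ch in uri:
--             if ch == '?':
--                 break
--             if ch == '/':
--                 buf = []
--                 seen_dot = False
--             else:
--                 buf.append(ch)
--                 if ch == '.':
--                     seen_dot = True
--         if buf and seen_dot and buf[-1] != '.':
--             return ''.join(buf)
--     except:
--         pass
--     return None
-- ===== Notes on version B (the rewrite author's own statement) =====
-- stated objective: alternative
-- what changed: Replaces A's staged split-into-lists pipeline plus a 40-entry extension table scanned with any() by one left-to-right character scan with an accumulator: the loop stops at '?', resets the buffer at each '/', and tracks a seen-dot flag, so the name, the query cut, the path cut and the dot test all come out of a single pass; the extension table is provably redundant since any table match already passes the generic dot test.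
import Mathlib
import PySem

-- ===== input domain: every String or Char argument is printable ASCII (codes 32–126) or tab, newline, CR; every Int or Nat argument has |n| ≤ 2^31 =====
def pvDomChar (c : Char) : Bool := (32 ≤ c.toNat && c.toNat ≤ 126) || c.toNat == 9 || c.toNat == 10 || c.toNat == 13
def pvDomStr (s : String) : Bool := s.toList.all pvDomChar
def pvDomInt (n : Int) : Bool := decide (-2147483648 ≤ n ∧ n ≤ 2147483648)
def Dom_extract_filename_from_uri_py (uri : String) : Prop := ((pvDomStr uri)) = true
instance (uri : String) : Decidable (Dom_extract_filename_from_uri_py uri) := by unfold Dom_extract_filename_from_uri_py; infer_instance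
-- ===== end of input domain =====

-- B replaces A's split-into-lists pipeline plus 40-entry extension table (redundant: any match
-- already passes the generic dot test) by ONE character scan with an accumulator (alternative).

-- ===== PORT A =====
-- the extension table of A, verbatim
def pvExtList : List String :=
  [".exe", ".dll", ".zip", ".rar", ".7z", ".tar", ".gz",
   ".pdf", ".doc", ".docx", ".xls", ".xlsx", ".ppt", ".pptx",
   ".jpg", ".jpeg", ".png", ".gif", ".bmp", ".tiff",
   ".mp3", ".mp4", ".avi", ".mkv", ".mov",
   ".txt", ".log", ".csv", ".json", ".xml",
   ".iso", ".img", ".bin",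
   ".msi", ".bat", ".sh", ".ps1", ".py", ".js", ".html", ".php"]

-- literal port of A; s.split(sep) is `Str.split?` (always `some` here since sep ≠ ""), its
-- [0] / [-1] indexing is `pyGet?` (always `some` here since split is never empty), so the
-- `.getD` defaults are unreachable and A raises nothing (the bare except is dead for strings).
def extract_filename_from_uri_py (uri : String) : Option String :=
  let path := if PySem.Str.isIn "?" uri then
      (PySem.List.pyGet? ((PySem.Str.split? uri "?").getD []) 0).getD "" else uri
  let filename := (PySem.List.pyGet? ((PySem.Str.split? path "/").getD []) (-1)).getD ""
  if filename != "" && PySem.Str.isIn "." filename && !PySem.Str.endswith filename "/" then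
    if pvExtList.any (fun ext => PySem.Str.endswith (PySem.Str.lower filename) ext) then
      some filename
    else if PySem.Str.isIn "." filename &&
        0 < PySem.Str.len ((PySem.List.pyGet? ((PySem.Str.split? filename ".").getD []) (-1)).getD "") then
      some filename
    else none
  else none

-- ===== PORT B =====
-- Source B's for-loop over the characters: state = (buf, seen_dot); `break` at '?' ends the recursion
def pvAltLoop : List Char → List Char → Bool → List Char × Bool
  | [], buf, seen => (buf, seen)
  | c :: t, buf, seen =>
    if c = '?' then (buf, seen)
    else if c = '/' then pvAltLoop t [] false
    else pvAltLoop t (buf ++ [c]) (seen || c = '.')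

def extract_filename_from_uri_py_alt (uri : String) : Option String :=
  let r := pvAltLoop uri.toList [] false
  if r.1 ≠ [] ∧ r.2 = true ∧ r.1.getLast? ≠ some '.' then some (String.ofList r.1) else none

-- ===== PRECONDITION & SPEC =====
def Spec_extract_filename_from_uri_py (uri : String) (out : Option String) : Prop := out = extract_filename_from_uri_py_alt uri
instance (uri : String) (out : Option String) : Decidable (Spec_extract_filename_from_uri_py uri out) := by unfold Spec_extract_filename_from_uri_py; infer_instance

-- ===== CLAIM (what is proved, stated in full; the proofs are below) =====
def Claim_equal_extract_filename_from_uri_py : Prop := ∀ (uri : String), Dom_extract_filename_from_uri_py uri → Spec_extract_filename_from_uri_py uri (extract_filename_from_uri_py uri)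

-- ===== LEMMAS AND PROOFS =====

-- structural model of s.split(c) for a single-character separator
def pvSplit (c : Char) : List Char → List (List Char)
  | [] => [[]]
  | a :: t =>
    if a = c then [] :: pvSplit c t
    else
      match pvSplit c t with
      | [] => [[a]]
      | h :: r => (a :: h) :: r

-- the segment of s after the last occurrence of c (s itself if c does not occur)
def pvSuffix (c : Char) : List Char → List Char
  | [] => []
  | a :: t => if c ∈ t then pvSuffix c t else if a = c then t else a :: t

theorem pvSplit_ne_nil (c : Char) (s : List Char) : pvSplit c s ≠ [] := by
  cases s with
  | nil => simp [pvSplit]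
  | cons a t =>
    simp only [pvSplit]
    split
    · simp
    · split <;> simp_all

theorem pvSplit_of_not_mem (c : Char) (s : List Char) (h : c ∉ s) : pvSplit c s = [s] := by
  induction s with
  | nil => rfl
  | cons a t ih =>
    simp only [List.mem_cons, not_or] at h
    simp [pvSplit, ih h.2, Ne.symm h.1]

theorem two_le_length_pvSplit (c : Char) (s : List Char) : c ∈ s ↔ 2 ≤ (pvSplit c s).length := by
  induction s with
  | nil => simp [pvSplit]
  | cons a t ih =>
    simp only [pvSplit, List.mem_cons]
    by_cases hac : a = c
    · subst hac
      have := pvSplit_ne_nil a t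
      cases h : pvSplit a t with
      | nil => exact absurd h this
      | cons x r => simp
    · simp only [hac]
      cases h : pvSplit c t with
      | nil => exact absurd h (pvSplit_ne_nil c t)
      | cons x r => simp only [h, List.length_cons] at ih ⊢; simpa [Ne.symm, hac] using ih

theorem head?_pvSplit (c : Char) (s : List Char) :
    (pvSplit c s).head? = some (s.takeWhile (fun a => a ≠ c)) := by
  induction s with
  | nil => rfl
  | cons a t ih =>
    simp only [pvSplit]
    by_cases hac : a = c
    · simp [hac]
    · cases h : pvSplit c t with
      | nil => exact absurd h (pvSplit_ne_nil c t)
      | cons x r =>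
        rw [h] at ih
        simp only [List.head?_cons, Option.some.injEq] at ih
        simp [hac, ih]

theorem pvSuffix_of_not_mem (c : Char) (s : List Char) (h : c ∉ s) : pvSuffix c s = s := by
  induction s with
  | nil => rfl
  | cons a t ih =>
    simp only [List.mem_cons, not_or] at h
    simp [pvSuffix, h.2, Ne.symm h.1]

theorem not_mem_pvSuffix (c : Char) (s : List Char) : c ∉ pvSuffix c s := by
  induction s with
  | nil => simp [pvSuffix]
  | cons a t ih =>
    simp only [pvSuffix]
    by_cases hm : c ∈ t
    · simpa [hm] using ih
    · by_cases hac : a = c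
      · simp [hm, hac]
      · rw [if_neg hm, if_neg hac]
        simp only [List.mem_cons, not_or]
        exact ⟨fun h => hac h.symm, hm⟩

theorem getLast?_pvSplit (c : Char) (s : List Char) :
    (pvSplit c s).getLast? = some (pvSuffix c s) := by
  induction s with
  | nil => rfl
  | cons a t ih =>
    simp only [pvSplit, pvSuffix]
    by_cases hac : a = c
    · subst hac
      by_cases hm : a ∈ t
      · cases h : pvSplit a t with
        | nil => exact absurd h (pvSplit_ne_nil a t)
        | cons x r =>
          rw [h] at ih
          simp only [hm, if_true, List.getLast?_cons_cons]
          exact ih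
      · rw [pvSplit_of_not_mem a t hm]
        simp [hm]
    · rw [if_neg hac]
      by_cases hm : c ∈ t
      · cases h : pvSplit c t with
        | nil => exact absurd h (pvSplit_ne_nil c t)
        | cons x r =>
          have h2 : 2 ≤ (pvSplit c t).length := (two_le_length_pvSplit c t).1 hm
          rw [h] at h2 ih
          cases r with
          | nil => simp at h2
          | cons y r' =>
            rw [if_pos hm]
            simp only [List.getLast?_cons_cons] at ih ⊢
            exact ih
      · rw [pvSplit_of_not_mem c t hm]
        simp [hm, hac]

theorem splitOn_go_eq (c : Char) (s : List Char) : ∀ (fuel : Nat) (cur : List Char) (acc : List (List Char)),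
    s.length ≤ fuel →
    PySem.Chars.splitOn.go [c] fuel s cur acc
      = acc.reverse ++ (cur.reverse ++ (pvSplit c s).headD []) :: (pvSplit c s).tail := by
  induction s with
  | nil =>
    intro fuel cur acc _
    cases fuel with
    | zero => rw [PySem.Chars.splitOn.go]; simp [pvSplit]
    | succ f =>
      rw [PySem.Chars.splitOn.go]
      simp [pvSplit]
      omega
  | cons a t ih =>
    intro fuel cur acc hf
    cases fuel with
    | zero => simp at hf
    | succ f =>
      rw [PySem.Chars.splitOn.go]
      have hf' : t.length ≤ f := by simpa using hf
      have hne := pvSplit_ne_nil c t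
      by_cases hac : c = a
      · subst hac
        have hpre : [c].isPrefixOf (c :: t) = true := by simp [List.isPrefixOf]
        rw [if_pos hpre, List.length_singleton, List.drop_one, List.tail_cons,
          ih f [] (List.reverse cur :: acc) hf']
        cases hp : pvSplit c t with
        | nil => exact absurd hp hne
        | cons x r =>
          simp [pvSplit, hp]
      · have hpre : ¬ [c].isPrefixOf (a :: t) = true := by
          simp only [List.isPrefixOf_iff_prefix, List.cons_prefix_cons]
          intro h
          exact hac h.1
        rw [if_neg hpre, ih f (a :: cur) acc hf']
        cases hp : pvSplit c t with
        | nil => exact absurd hp hne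
        | cons x r =>
          have hca : ¬ a = c := fun h => hac h.symm
          simp [pvSplit, hp, hca]

theorem splitOn_single (c : Char) (s : List Char) :
    PySem.Chars.splitOn s [c] = pvSplit c s := by
  have h := splitOn_go_eq c s (s.length + 1) [] [] (by omega)
  have hne := pvSplit_ne_nil c s
  cases hsp : pvSplit c s with
  | nil => exact absurd hsp hne
  | cons x r => rw [hsp] at h; simpa [PySem.Chars.splitOn, hsp] using h

theorem pvExtList_fact : ∀ ext ∈ pvExtList, ext.toList ≠ [] ∧ ext.toList.getLast? ≠ some '.' := by
  decide

theorem pyGet?_neg_one {α : Type} (l : List α) : PySem.List.pyGet? l (-1) = l.getLast? := by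
  unfold PySem.List.pyGet? PySem.List.pyIdx?
  cases l with
  | nil => rfl
  | cons a t =>
    rw [if_neg (by omega), if_pos (by simp only [List.length_cons]; omega)]
    have h1 : ((-(-1 : Int)).toNat) = 1 := by norm_num
    simp [List.getLast?_eq_getElem?]

theorem split?_single (p : String) (c : Char) (sep : String) (hsep : sep.toList = [c]) :
    ∃ L, PySem.Str.split? p sep = some L ∧ L.map String.toList = pvSplit c p.toList := by
  have h := PySem.Str.split?_map p sep
  rw [hsep, PySem.Chars.split?, if_neg (by simp)] at h
  cases hs : PySem.Str.split? p sep with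
  | none => rw [hs] at h; simp at h
  | some L =>
    rw [hs] at h
    simp only [Option.map_some, Option.some.injEq] at h
    exact ⟨L, rfl, by rw [h, splitOn_single]⟩

-- A's  s.split(sep)[-1]  computes pvSuffix c of s, for a single-character sep
theorem extract_last (p : String) (c : Char) (sep : String) (hsep : sep.toList = [c]) :
    ((PySem.List.pyGet? ((PySem.Str.split? p sep).getD []) (-1)).getD "").toList
      = pvSuffix c p.toList := by
  obtain ⟨L, hL, hmap⟩ := split?_single p c sep hsep
  rw [hL, Option.getD_some, pyGet?_neg_one]
  have h1 : (L.map String.toList).getLast? = some (pvSuffix c p.toList) := by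
    rw [hmap, getLast?_pvSplit]
  rw [List.getLast?_map] at h1
  cases hg : L.getLast? with
  | none => rw [hg] at h1; simp at h1
  | some x =>
    rw [hg] at h1
    simp only [Option.map_some, Option.some.injEq] at h1
    rw [Option.getD_some]
    exact h1

-- A's  s.split('?')[0]  computes takeWhile (≠ '?')
theorem extract_head (p : String) :
    ((PySem.List.pyGet? ((PySem.Str.split? p "?").getD []) 0).getD "").toList
      = p.toList.takeWhile (fun a => a ≠ '?') := by
  obtain ⟨L, hL, hmap⟩ := split?_single p '?' "?" rfl
  rw [hL, Option.getD_some]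
  rw [show (0 : Int) = ((0 : Nat) : Int) from rfl, PySem.List.pyGet?_natCast]
  have h1 : (L.map String.toList).head? = some (p.toList.takeWhile (fun a => a ≠ '?')) := by
    rw [hmap, head?_pvSplit]
  rw [List.head?_map] at h1
  cases L with
  | nil => simp at h1
  | cons s0 Ls =>
    simp only [List.head?_cons, Option.map_some, Option.some.injEq] at h1
    simp only [List.getElem?_cons_zero, Option.getD_some]
    exact h1

theorem any_ext_last (F : String)
    (h : pvExtList.any (fun ext => PySem.Str.endswith (PySem.Str.lower F) ext) = true) :
    F.toList ≠ [] ∧ F.toList.getLast? ≠ some '.' := by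
  rw [List.any_eq_true] at h
  obtain ⟨ext, hmem, hend⟩ := h
  have hfact := pvExtList_fact ext hmem
  rw [PySem.Str.endswith_eq] at hend
  have hsuf : ext.toList <:+ (PySem.Str.lower F).toList :=
    (PySem.Chars.endswith_iff _ _).1 hend
  rw [PySem.Str.toList_lower, PySem.Chars.lower] at hsuf
  obtain ⟨w, hw⟩ := hsuf
  constructor
  · intro hF
    rw [hF] at hw
    simp only [List.map_nil, List.append_eq_nil_iff] at hw
    exact hfact.1 hw.2
  · intro hlast
    have h1 : (List.map PySem.Chars.lowerChar F.toList).getLast? = some '.' := by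
      rw [List.getLast?_map, hlast]
      rfl
    have hsome : ∃ y, ext.toList.getLast? = some y := by
      cases hg : ext.toList.getLast? with
      | none => exact absurd (List.getLast?_eq_none_iff.1 hg) hfact.1
      | some y => exact ⟨y, rfl⟩
    obtain ⟨y, hy⟩ := hsome
    have h2 : (w ++ ext.toList).getLast? = some y := by
      rw [List.getLast?_append, hy]
      rfl
    rw [hw, h1] at h2
    exact hfact.2 (hy.trans h2.symm)

theorem str_isIn_single (c : Char) (sep : String) (hsep : sep.toList = [c]) (F : String) :
    PySem.Str.isIn sep F = true ↔ c ∈ F.toList := by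
  rw [PySem.Str.isIn_eq, hsep, PySem.Chars.isIn_iff_infix]
  exact List.singleton_infix_iff c F.toList

theorem str_ne_empty_iff (F : String) : (F != "") = true ↔ F.toList ≠ [] := by
  rw [bne_iff_ne]
  constructor
  · intro h hl
    exact h (String.toList_inj.1 (by rw [hl]; rfl))
  · intro h he
    exact h (by rw [he]; rfl)

-- pvSuffix c s is empty exactly when s is empty or ends with c
theorem pvSuffix_eq_nil_iff (c : Char) (s : List Char) :
    pvSuffix c s = [] ↔ (s = [] ∨ s.getLast? = some c) := by
  induction s with
  | nil => simp [pvSuffix]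
  | cons a t ih =>
    simp only [pvSuffix]
    by_cases hm : c ∈ t
    · cases t with
      | nil => simp at hm
      | cons b t' =>
        rw [if_pos hm, List.getLast?_cons_cons, ih]
        simp
    · rw [if_neg hm]
      by_cases hac : a = c
      · subst hac
        rw [if_pos rfl]
        constructor
        · intro h; subst h; simp
        · rintro (h | h)
          · simp at h
          · cases t with
            | nil => rfl
            | cons b t' =>
              rw [List.getLast?_cons_cons] at h
              exact absurd (List.mem_of_getLast? h) hm
      · rw [if_neg hac]
        constructor
        · intro h; simp at h
        · rintro (h | h)
          · simp at h
          · have hmem := List.mem_of_getLast? h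
            simp only [List.mem_cons] at hmem
            rcases hmem with h' | h'
            · exact absurd h'.symm hac
            · exact absurd h' hm

-- takeWhile (≠ '?') keeps everything when '?' does not occur
theorem takeWhile_all (s : List Char) (h : '?' ∉ s) :
    s.takeWhile (fun a => a ≠ '?') = s := by
  induction s with
  | nil => rfl
  | cons a t ih =>
    simp only [List.mem_cons, not_or] at h
    have ha' : ¬ a = '?' := fun hh => h.1 hh.symm
    rw [List.takeWhile_cons, if_pos (by simpa using ha'), ih h.2]

-- the characterisation of Source B's loop: it computes the last '/'-free segment of the pre-'?' part
theorem pvAltLoop_spec (s : List Char) : ∀ (buf : List Char) (seen : Bool),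
    pvAltLoop s buf seen =
      (let pre := s.takeWhile (fun a => a ≠ '?')
       if '/' ∈ pre then (pvSuffix '/' pre, decide ('.' ∈ pvSuffix '/' pre))
       else (buf ++ pre, seen || decide ('.' ∈ pre))) := by
  induction s with
  | nil => intro buf seen; simp [pvAltLoop]
  | cons c t ih =>
    intro buf seen
    simp only [pvAltLoop]
    by_cases hq : c = '?'
    · subst hq
      simp [List.takeWhile_cons]
    · rw [if_neg hq]
      have hpre : (c :: t).takeWhile (fun a => a ≠ '?') = c :: t.takeWhile (fun a => a ≠ '?') := by
        simp [List.takeWhile_cons, hq]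
      set pre := t.takeWhile (fun a => a ≠ '?') with hpredef
      by_cases hs : c = '/'
      · subst hs
        rw [if_pos rfl, ih [] false, hpre]
        simp only
        by_cases hm : '/' ∈ pre
        · simp [hm, pvSuffix]
        · simp [hm, pvSuffix, pvSuffix_of_not_mem '/' pre hm]
      · rw [if_neg hs, ih (buf ++ [c]) (seen || decide (c = '.')), hpre]
        simp only
        by_cases hm : '/' ∈ pre
        · have hm' : '/' ∈ c :: pre := by simp [hm]
          rw [if_pos hm, if_pos hm']
          have : pvSuffix '/' (c :: pre) = pvSuffix '/' pre := by simp [pvSuffix, hm]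
          rw [this]
        · have hm' : '/' ∉ c :: pre := by
            simp only [List.mem_cons, not_or]
            exact ⟨fun h => hs h.symm, hm⟩
          rw [if_neg hm, if_neg hm']
          simp only [Prod.mk.injEq]
          refine ⟨by simp, ?_⟩
          by_cases h1 : c = '.' <;> by_cases h2 : '.' ∈ pre <;>
            simp [h1, h2, eq_comm, Bool.or_assoc]

-- the decision part of A equals B's final test, for a filename without '/'
theorem cond_main (F : String) (hnoslash : '/' ∉ F.toList) :
    (if F != "" && PySem.Str.isIn "." F && !PySem.Str.endswith F "/" then
      if pvExtList.any (fun ext => PySem.Str.endswith (PySem.Str.lower F) ext) then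
        some F
      else if PySem.Str.isIn "." F &&
          0 < PySem.Str.len ((PySem.List.pyGet? ((PySem.Str.split? F ".").getD []) (-1)).getD "") then
        some F
      else none
    else none)
    = if F.toList ≠ [] ∧ '.' ∈ F.toList ∧ F.toList.getLast? ≠ some '.' then
        some (String.ofList F.toList) else none := by
  have hends : PySem.Str.endswith F "/" = false := by
    rw [PySem.Str.endswith_eq]
    show PySem.Chars.endswith F.toList ['/'] = false
    cases hE : PySem.Chars.endswith F.toList ['/'] with
    | false => rfl
    | true =>
      have hsuf := (PySem.Chars.endswith_iff _ _).1 hE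
      exact absurd (hsuf.subset (by simp)) hnoslash
  have hinner := extract_last F '.' "." rfl
  have hlen2 : PySem.Str.len ((PySem.List.pyGet? ((PySem.Str.split? F ".").getD []) (-1)).getD "")
      = ((pvSuffix '.' F.toList).length : Int) := by
    rw [PySem.Str.len_eq, hinner]
  have hIs := str_isIn_single '.' "." rfl F
  have hFne := str_ne_empty_iff F
  have hmkF : String.ofList F.toList = F := by
    apply String.toList_inj.1
    simp
  by_cases hc : F.toList ≠ [] ∧ '.' ∈ F.toList ∧ F.toList.getLast? ≠ some '.'
  · rw [if_pos hc, hmkF]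
    obtain ⟨h1, h2, h3⟩ := hc
    have houter : (F != "" && PySem.Str.isIn "." F && !PySem.Str.endswith F "/") = true := by
      rw [hFne.2 h1, hIs.2 h2, hends]
      rfl
    rw [if_pos houter]
    by_cases hany : (pvExtList.any (fun ext => PySem.Str.endswith (PySem.Str.lower F) ext)) = true
    · rw [if_pos hany]
    · have hne : pvSuffix '.' F.toList ≠ [] := by
        rw [Ne, pvSuffix_eq_nil_iff]
        push_neg
        exact ⟨h1, h3⟩
      have hpos : 0 < (pvSuffix '.' F.toList).length := List.length_pos_of_ne_nil hne
      have hsec : (PySem.Str.isIn "." F &&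
          0 < PySem.Str.len ((PySem.List.pyGet? ((PySem.Str.split? F ".").getD []) (-1)).getD "")) = true := by
        rw [hIs.2 h2, hlen2]
        simp only [Bool.and_eq_true, decide_eq_true_eq]
        exact ⟨trivial, by exact_mod_cast hpos⟩
      rw [if_neg hany, if_pos hsec]
  · rw [if_neg hc]
    push_neg at hc
    by_cases h1 : F.toList = []
    · have : ¬ (F != "" && PySem.Str.isIn "." F && !PySem.Str.endswith F "/") = true := by
        intro h
        simp only [Bool.and_eq_true] at h
        exact (hFne.1 h.1.1) h1
      rw [if_neg this]
    · by_cases h2 : '.' ∈ F.toList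
      · have h3 := hc h1 h2
        have houter : (F != "" && PySem.Str.isIn "." F && !PySem.Str.endswith F "/") = true := by
          rw [hFne.2 h1, hIs.2 h2, hends]
          rfl
        rw [if_pos houter]
        have hanyf : ¬ (pvExtList.any (fun ext => PySem.Str.endswith (PySem.Str.lower F) ext)) = true := by
          intro hA
          exact (any_ext_last F hA).2 h3
        have hnil : pvSuffix '.' F.toList = [] := (pvSuffix_eq_nil_iff '.' F.toList).2 (Or.inr h3)
        have hsecf : ¬ (PySem.Str.isIn "." F &&
            0 < PySem.Str.len ((PySem.List.pyGet? ((PySem.Str.split? F ".").getD []) (-1)).getD "")) = true := by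
          rw [hlen2, hnil]
          simp
        rw [if_neg hanyf, if_neg hsecf]
      · have : ¬ (F != "" && PySem.Str.isIn "." F && !PySem.Str.endswith F "/") = true := by
          intro h
          simp only [Bool.and_eq_true] at h
          exact h2 (hIs.1 h.1.2)
        rw [if_neg this]

-- ===== VERDICT (by name: the statement is the Claim_ definition above) =====
set_option maxHeartbeats 1000000 in
theorem extract_filename_from_uri_py_spec : Claim_equal_extract_filename_from_uri_py := by
  intro uri _
  unfold Spec_extract_filename_from_uri_py extract_filename_from_uri_py extract_filename_from_uri_py_alt
  dsimp only
  -- A's path is the pre-'?' prefix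
  have hpath : (if PySem.Str.isIn "?" uri then
        (PySem.List.pyGet? ((PySem.Str.split? uri "?").getD []) 0).getD "" else uri).toList
      = uri.toList.takeWhile (fun a => a ≠ '?') := by
    by_cases hq : '?' ∈ uri.toList
    · rw [if_pos ((str_isIn_single '?' "?" rfl uri).2 hq)]
      exact extract_head uri
    · rw [if_neg (fun h => hq ((str_isIn_single '?' "?" rfl uri).1 h)),
        takeWhile_all uri.toList hq]
  set path := (if PySem.Str.isIn "?" uri then
      (PySem.List.pyGet? ((PySem.Str.split? uri "?").getD []) 0).getD "" else uri) with hpdef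
  set Fs := (PySem.List.pyGet? ((PySem.Str.split? path "/").getD []) (-1)).getD "" with hFdef
  have hF : Fs.toList = pvSuffix '/' (uri.toList.takeWhile (fun a => a ≠ '?')) := by
    rw [hFdef, extract_last path '/' "/" rfl, hpath]
  -- B's loop computes the same segment and its dot flag
  have hB : pvAltLoop uri.toList [] false
      = (Fs.toList, decide ('.' ∈ Fs.toList)) := by
    rw [pvAltLoop_spec uri.toList [] false, hF]
    simp only
    by_cases hm : '/' ∈ uri.toList.takeWhile (fun a => a ≠ '?')
    · rw [if_pos hm]
    · rw [if_neg hm, pvSuffix_of_not_mem '/' _ hm]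
      simp
  rw [hB]
  have hmain := cond_main Fs (by rw [hF]; exact not_mem_pvSuffix '/' _)
  rw [hmain]
  exact if_congr (by simp) rfl rfl
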